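-- pv_equiv track=rewrite | github.com/KyleFranciz/corg-ai | backend/api/routes/websocket.py | _extract_speakable_segments
-- ===== SOURCE A (Python) =====
-- def _extract_speakable_segments(buffer: str) -> tuple[list[str], str]:
--     delimiters = {'.', '!', '?', '\n'}
--     segments: list[str] = []
--     start = 0
--
--     for index, char in enumerate(buffer):
--         if char not in delimiters:
--             continue
--
--         segment = buffer[start:index + 1].strip()
--         if segment:
--             segments.append(segment)
--         start = index + 1
--
--     remainder = buffer[start:]
--     return segments, remainder
-- ===== SOURCE B (Python) =====
-- def _extract_speakable_segments(buffer: str) -> tuple[list[str], str]: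
--     segments: list[str] = []
--     chunk: list[str] = []
--     for char in buffer:
--         chunk.append(char)
--         if char in '.!?\n':
--             segment = ''.join(chunk).strip()
--             if segment:
--                 segments.append(segment)
--             chunk = []
--     return segments, ''.join(chunk)
-- ===== Notes on version B (the rewrite author's own statement) =====
-- stated objective: idiomatic
-- what changed: B accumulates the current segment's characters in a growing chunk and flushes it on each delimiter, instead of A's index bookkeeping with repeated slicing of the whole buffer; the remainder is just the unflushed chunk.
import Mathlib
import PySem

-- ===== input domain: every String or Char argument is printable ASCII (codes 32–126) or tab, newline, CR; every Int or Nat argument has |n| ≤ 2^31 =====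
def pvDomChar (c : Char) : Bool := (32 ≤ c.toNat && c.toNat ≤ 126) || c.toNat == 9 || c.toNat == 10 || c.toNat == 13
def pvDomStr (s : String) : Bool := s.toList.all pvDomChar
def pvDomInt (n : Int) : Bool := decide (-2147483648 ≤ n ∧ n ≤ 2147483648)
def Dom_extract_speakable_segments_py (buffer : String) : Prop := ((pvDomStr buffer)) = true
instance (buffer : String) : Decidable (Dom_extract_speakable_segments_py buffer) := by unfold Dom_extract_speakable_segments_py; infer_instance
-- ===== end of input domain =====

-- B replaces A's start-index bookkeeping (repeated slicing of the whole buffer) by a chunk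
-- accumulator that is flushed at each delimiter; same values, idiomatic single-state scan.

-- ===== PORT A =====
-- A's loop body: on a delimiter, strip buffer[start:index+1], append if non-empty, move start.
def pvAStep (cs : List Char) (acc : List String × Int) (p : Int × Char) : List String × Int :=
  if p.2 ∈ ['.', '!', '?', '\n'] then
    let seg := PySem.Chars.strip (PySem.List.slice cs (some acc.2) (some (p.1 + 1)))
    (if seg ≠ [] then acc.1 ++ [String.ofList seg] else acc.1, p.1 + 1)
  else acc

def extract_speakable_segments_py (buffer : String) : List String × String :=
  let cs := buffer.toList
  let st := (PySem.List.enumerate cs 0).foldl (pvAStep cs) ([], 0)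
  (st.1, String.ofList (PySem.List.slice cs (some st.2) none))

-- ===== PORT B =====
-- B's loop body: grow the chunk; on a delimiter, strip and flush it.
def pvBStep (acc : List String × List Char) (c : Char) : List String × List Char :=
  let chunk := acc.2 ++ [c]
  if c ∈ ['.', '!', '?', '\n'] then
    let seg := PySem.Chars.strip chunk
    (if seg ≠ [] then acc.1 ++ [String.ofList seg] else acc.1, [])
  else (acc.1, chunk)

def extract_speakable_segments_py_alt (buffer : String) : List String × String :=
  let st := buffer.toList.foldl pvBStep ([], [])
  (st.1, String.ofList st.2)

-- ===== PRECONDITION & SPEC =====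
def Spec_extract_speakable_segments_py (buffer : String) (out : List String × String) : Prop := out = extract_speakable_segments_py_alt buffer
instance (buffer : String) (out : List String × String) : Decidable (Spec_extract_speakable_segments_py buffer out) := by unfold Spec_extract_speakable_segments_py; infer_instance

-- ===== CLAIM (what is proved, stated in full; the proofs are below) =====
def Claim_equal_extract_speakable_segments_py : Prop := ∀ (buffer : String), Dom_extract_speakable_segments_py buffer → Spec_extract_speakable_segments_py buffer (extract_speakable_segments_py buffer)

-- ===== LEMMAS AND PROOFS =====

-- One step of B's chunk: appending the next character.
theorem pv_take_succ_drop (cs : List Char) (k start : Nat) (hs : start ≤ k) (hk : k < cs.length) :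
    (cs.take (k + 1)).drop start = (cs.take k).drop start ++ [cs[k]] := by
  rw [List.take_add_one, List.getElem?_eq_getElem hk]
  rw [List.drop_append]
  have h1 : (cs.take k).length = k := by simp; omega
  rw [h1]
  have : start - k = 0 := by omega
  simp [this]

-- Main loop invariant: with start ≤ k ≤ |cs|, A's remaining fold from position k with
-- start index `start` agrees with B's remaining fold whose chunk is cs[start:k].
theorem pv_loop (cs : List Char) (k start : Nat) (segs : List String)
    (hs : start ≤ k) (hk : k ≤ cs.length) :
    (let st := (PySem.List.enumerate (cs.drop k) k).foldl (pvAStep cs) (segs, (start : Int));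
     (st.1, String.ofList (PySem.List.slice cs (some st.2) none)))
    = (let st := (cs.drop k).foldl pvBStep (segs, (cs.take k).drop start);
       (st.1, String.ofList st.2)) := by
  by_cases h : k < cs.length
  · have hdrop : cs.drop k = cs[k] :: cs.drop (k + 1) :=
      List.drop_eq_getElem_cons h
    rw [hdrop, PySem.List.enumerate_cons]
    simp only [List.foldl_cons]
    by_cases hd : cs[k] ∈ ['.', '!', '?', '\n']
    · have hstep : pvAStep cs (segs, (start : Int)) ((k : Int), cs[k]) =
        (if PySem.Chars.strip (PySem.List.slice cs (some (start : Int)) (some ((k : Int) + 1))) ≠ []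
         then segs ++ [String.ofList (PySem.Chars.strip (PySem.List.slice cs (some (start : Int)) (some ((k : Int) + 1))))]
         else segs, (k : Int) + 1) := by
        simp [pvAStep, hd]
      have hseg : PySem.List.slice cs (some (start : Int)) (some ((k : Int) + 1))
          = (cs.take k).drop start ++ [cs[k]] := by
        have : ((k : Int) + 1) = ((k + 1 : Nat) : Int) := by push_cast; ring
        rw [this, PySem.List.slice_natCast, ← pv_take_succ_drop cs k start hs h,
          List.drop_take]
      have hB : pvBStep (segs, (cs.take k).drop start) cs[k] =
        (if PySem.Chars.strip ((cs.take k).drop start ++ [cs[k]]) ≠ []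
         then segs ++ [String.ofList (PySem.Chars.strip ((cs.take k).drop start ++ [cs[k]]))]
         else segs, []) := by
        simp [pvBStep, hd]
      rw [hstep, hB, hseg]
      have hk1 : ((k : Int) + 1) = ((k + 1 : Nat) : Int) := by push_cast; ring
      rw [hk1]
      have hempty : (cs.take (k + 1)).drop (k + 1) = [] := by
        apply List.drop_eq_nil_of_le; simp
      have := pv_loop cs (k + 1)
        (k + 1)
        (if PySem.Chars.strip ((cs.take k).drop start ++ [cs[k]]) ≠ []
         then segs ++ [String.ofList (PySem.Chars.strip ((cs.take k).drop start ++ [cs[k]]))]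
         else segs)
        (le_refl _) h
      rw [hempty] at this
      exact this
    · have hstep : pvAStep cs (segs, (start : Int)) ((k : Int), cs[k]) = (segs, (start : Int)) := by
        simp [pvAStep, hd]
      have hB : pvBStep (segs, (cs.take k).drop start) cs[k] =
          (segs, (cs.take (k + 1)).drop start) := by
        simp [pvBStep, hd, pv_take_succ_drop cs k start hs h]
      rw [hstep, hB]
      exact pv_loop cs (k + 1) start segs (by omega) h
  · have hk' : k = cs.length := by omega
    have : cs.drop k = [] := by simp [hk']
    rw [this]
    simp only [List.foldl_nil, PySem.List.enumerate_nil]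
    rw [PySem.List.slice_from_natCast]
    congr 2
    rw [hk', List.take_length]
termination_by cs.length - k

-- ===== VERDICT (by name: the statement is the Claim_ definition above) =====
theorem extract_speakable_segments_py_spec : Claim_equal_extract_speakable_segments_py := by
  intro buffer _
  unfold Spec_extract_speakable_segments_py extract_speakable_segments_py extract_speakable_segments_py_alt
  have := pv_loop buffer.toList 0 0 [] (le_refl 0) (Nat.zero_le _)
  simpa using this
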